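-- pv_equiv track=rewrite | github.com/whansel007/CallSnap | name_detector.py | name_in_text
-- ===== SOURCE A (Python) =====
-- def name_in_text(target: list[str], text: str) -> bool:
--     """Check if target name is in text"""
--     text = text.strip().lower()
--
--     if not target or not text:
--         return False
--
--     for name in target:
--         if name in text:
--             return True
--
--     return False
-- ===== SOURCE B (Python) =====
-- def name_in_text(target: list[str], text: str) -> bool:
--     """Check if target name is in text (suffix scan by an advancing index)"""
--     if not target:
--         return False
--     s = text.strip().lower()
--     i = 0
--     while i < len(s):
--         if any(s.startswith(name, i) for name in target):
--             return True
--         i += 1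
--     return False
-- ===== Notes on version B (the rewrite author's own statement) =====
-- stated objective: alternative
-- what changed: Replaces the name-major loop of full substring scans by a single index-advancing suffix scan of the text that at each position tests whether some target name starts there; the empty-text guard disappears because the loop condition handles it.
import Mathlib
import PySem

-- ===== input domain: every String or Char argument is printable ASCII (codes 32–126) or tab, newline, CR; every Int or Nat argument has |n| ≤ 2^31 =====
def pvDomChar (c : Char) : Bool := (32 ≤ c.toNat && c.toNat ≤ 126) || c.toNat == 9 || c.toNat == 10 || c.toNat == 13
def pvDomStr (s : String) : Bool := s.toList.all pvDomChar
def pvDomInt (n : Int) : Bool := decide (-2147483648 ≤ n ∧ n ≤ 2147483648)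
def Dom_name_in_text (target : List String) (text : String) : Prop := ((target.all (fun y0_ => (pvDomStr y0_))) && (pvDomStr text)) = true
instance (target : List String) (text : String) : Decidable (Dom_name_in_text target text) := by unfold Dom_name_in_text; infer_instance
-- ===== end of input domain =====

-- B replaces A's name-major loop (one full substring scan per name) by a recursive
-- suffix scan of the text that tests at each suffix whether some name is its prefix.

-- ===== PORT A =====
def name_in_text (target : List String) (text : String) : Bool :=
  let t : List Char := PySem.Chars.lower (PySem.Chars.strip text.toList)
  if target.isEmpty || t.isEmpty then false
  else target.any (fun name => PySem.Chars.isIn name.toList t)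

-- ===== PORT B =====
-- the while loop: i walks the text; at each i test every name as a prefix of s[i:]
-- (s.startswith(name, i) with 0 ≤ i ≤ len(s) is exactly: name.toList <+: s.drop i)
def pvScanB (target : List String) (s : List Char) (i : Nat) : Bool :=
  if i < s.length then
    if target.any (fun name => PySem.Chars.startswith (s.drop i) name.toList) then true
    else pvScanB target s (i + 1)
  else false
termination_by s.length - i

def name_in_text_alt (target : List String) (text : String) : Bool :=
  if target.isEmpty then false
  else pvScanB target (PySem.Chars.lower (PySem.Chars.strip text.toList)) 0

-- ===== PRECONDITION & SPEC =====
def Spec_name_in_text (target : List String) (text : String) (out : Bool) : Prop := out = name_in_text_alt target text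
instance (target : List String) (text : String) (out : Bool) : Decidable (Spec_name_in_text target text out) := by unfold Spec_name_in_text; infer_instance

-- ===== CLAIM (what is proved, stated in full; the proofs are below) =====
def Claim_equal_name_in_text : Prop := ∀ (target : List String) (text : String), Dom_name_in_text target text → Spec_name_in_text target text (name_in_text target text)

-- ===== LEMMAS AND PROOFS =====

-- The index scan from i succeeds iff some name is a prefix of t.drop j for some i ≤ j < |t|.
theorem pvScanB_iff (target : List String) (t : List Char) (i : Nat) :
    pvScanB target t i = true ↔
      ∃ j : Nat, i ≤ j ∧ j < t.length ∧ ∃ name ∈ target, name.toList <+: t.drop j := by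
  induction hn : t.length - i using Nat.strong_induction_on generalizing i with
  | _ n ih => ?_
  rw [pvScanB]
  split_ifs with hlt h
  · simp only [true_iff]
    simp only [List.any_eq_true, PySem.Chars.startswith_iff] at h
    obtain ⟨name, hmem, hp⟩ := h
    exact ⟨i, le_refl i, hlt, name, hmem, hp⟩
  · rw [ih (t.length - (i + 1)) (by omega) (i + 1) rfl]
    constructor
    · rintro ⟨j, hij, hj, hx⟩
      exact ⟨j, by omega, hj, hx⟩
    · rintro ⟨j, hij, hj, name, hmem, hp⟩
      rcases Nat.eq_or_lt_of_le hij with rfl | hgt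
      · exact absurd (List.any_eq_true.mpr ⟨name, hmem,
          (PySem.Chars.startswith_iff _ _).mpr hp⟩) h
      · exact ⟨j, hgt, hj, name, hmem, hp⟩
  · simp only [false_iff]
    rintro ⟨j, hij, hj, -⟩
    omega

-- 'sub in t' iff some position i < |t| has sub as prefix of t.drop i (for nonempty t).
theorem isIn_iff_exists_pos (sub t : List Char) (ht : t ≠ []) :
    PySem.Chars.isIn sub t = true ↔ ∃ i : Nat, i < t.length ∧ sub <+: t.drop i := by
  rw [← PySem.Chars.exists_prefix_drop_iff_isIn]
  constructor
  · rintro ⟨j, hj⟩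
    by_cases h : j < t.length
    · exact ⟨j, h, hj⟩
    · have hd : t.drop j = [] := List.drop_eq_nil_of_le (by omega)
      rw [hd] at hj
      have hs : sub = [] := List.prefix_nil.mp hj
      exact ⟨0, by cases t <;> simp_all, by simp [hs]⟩
  · rintro ⟨i, _, hp⟩; exact ⟨i, hp⟩

-- ===== VERDICT (by name: the statement is the Claim_ definition above) =====
theorem name_in_text_spec : Claim_equal_name_in_text := by
  intro target text _
  show name_in_text target text = name_in_text_alt target text
  simp only [name_in_text, name_in_text_alt]
  by_cases htgt : target.isEmpty
  · simp [htgt]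
  · simp only [htgt, Bool.false_or]
    set t := PySem.Chars.lower (PySem.Chars.strip text.toList) with ht
    by_cases hnil : t.isEmpty
    · have : t = [] := List.isEmpty_iff.mp hnil
      simp [this, pvScanB]
    · simp only [hnil]
      rw [if_neg (by decide), if_neg (by decide)]
      have htne : t ≠ [] := by simpa [List.isEmpty_iff] using hnil
      apply Bool.eq_iff_iff.mpr
      rw [pvScanB_iff]
      simp only [Nat.zero_le, true_and]
      simp only [List.any_eq_true]
      constructor
      · rintro ⟨name, hmem, hin⟩
        obtain ⟨i, hi, hp⟩ := (isIn_iff_exists_pos name.toList t htne).mp hin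
        exact ⟨i, hi, name, hmem, hp⟩
      · rintro ⟨i, hi, name, hmem, hp⟩
        exact ⟨name, hmem, (isIn_iff_exists_pos name.toList t htne).mpr ⟨i, hi, hp⟩⟩
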